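-- pv_equiv track=rewrite | github.com/poker26/eas-mcp-server | eas_client.py | parse_contacts
-- ===== SOURCE A (Python) =====
-- def parse_contacts(elements: list) -> list:
--     contacts = []
--     cur = {}
--     fields = {
--         "FileAs", "FirstName", "LastName", "MiddleName",
--         "CompanyName", "Department", "JobTitle",
--         "Email1Address", "Email2Address", "Email3Address",
--         "BusinessPhoneNumber", "MobilePhoneNumber",
--         "HomePhoneNumber", "BusinessCity", "BusinessStreet",
--     }
--     for _, tag, value in elements:
--         if tag == "ServerId" and value:
--             if cur.get("FileAs") or cur.get("FirstName"):
--                 contacts.append(cur)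
--             cur = {"server_id": value}
--             continue
--         if value is not None and tag in fields:
--             cur[tag] = value
--     if cur.get("FileAs") or cur.get("FirstName"):
--         contacts.append(cur)
--     return contacts
-- ===== SOURCE B (Python) =====
-- FIELDS = frozenset({
--     "FileAs", "FirstName", "LastName", "MiddleName",
--     "CompanyName", "Department", "JobTitle",
--     "Email1Address", "Email2Address", "Email3Address",
--     "BusinessPhoneNumber", "MobilePhoneNumber",
--     "HomePhoneNumber", "BusinessCity", "BusinessStreet",
-- })
--
--
-- def parse_contacts(elements: list) -> list:
--     # Pass 1: cut into segments at each truthy ServerId marker.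
--     # Each segment is (server_id or None, [(tag, value), ...]).
--     segments = []
--     sid = None
--     items = []
--     for _, tag, value in elements:
--         if tag == "ServerId" and value:
--             segments.append((sid, items))
--             sid, items = value, []
--         else:
--             items.append((tag, value))
--     segments.append((sid, items))
--
--     # Pass 2: build one dict per segment, keep those with a truthy name.
--     out = []
--     for sid, items in segments:
--         d = {} if sid is None else {"server_id": sid}
--         for tag, value in items:
--             if value is not None and tag in FIELDS:
--                 d[tag] = value
--         if d.get("FileAs") or d.get("FirstName"):
--             out.append(d)
--     return out
-- ===== Notes on version B (the rewrite author's own statement) =====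
-- stated objective: alternative
-- what changed: Replaces A's single stateful loop (mutating a current dict and flushing it at each ServerId) by a two-pass decomposition: first cut the elements into ServerId-delimited segments, then independently build, filter and emit one dict per segment.
import Mathlib
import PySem

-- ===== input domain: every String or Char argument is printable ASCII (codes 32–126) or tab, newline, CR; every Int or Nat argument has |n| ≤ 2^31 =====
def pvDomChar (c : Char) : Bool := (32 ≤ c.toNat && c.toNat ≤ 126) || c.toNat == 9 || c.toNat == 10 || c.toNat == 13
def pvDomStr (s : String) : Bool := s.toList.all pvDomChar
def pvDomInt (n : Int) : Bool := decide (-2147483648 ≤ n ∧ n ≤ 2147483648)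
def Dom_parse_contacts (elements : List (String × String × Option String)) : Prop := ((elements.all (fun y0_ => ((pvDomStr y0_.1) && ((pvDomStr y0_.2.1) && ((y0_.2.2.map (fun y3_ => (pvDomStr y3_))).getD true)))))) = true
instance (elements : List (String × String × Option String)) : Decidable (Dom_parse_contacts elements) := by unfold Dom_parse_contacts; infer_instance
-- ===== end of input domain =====

-- B replaces A's single stateful accumulation loop by a two-pass decomposition (split into
-- ServerId-delimited segments, then build/filter one dict per segment); objective: alternative.

-- ===== PORT A =====
def pvFieldsA : List String :=
  ["FileAs", "FirstName", "LastName", "MiddleName",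
   "CompanyName", "Department", "JobTitle",
   "Email1Address", "Email2Address", "Email3Address",
   "BusinessPhoneNumber", "MobilePhoneNumber",
   "HomePhoneNumber", "BusinessCity", "BusinessStreet"]

-- truthiness of a value: a string that is not None and not ""
def pvTruthyA (v : Option String) : Bool :=
  match v with
  | some s => s != ""
  | none => false

-- cur.get("FileAs") or cur.get("FirstName")
def pvKeepA (d : PySem.Dict String String) : Bool :=
  pvTruthyA (d.get? "FileAs") || pvTruthyA (d.get? "FirstName")

-- one iteration of A's for-loop over (contacts, cur)
def pvStepA (st : List (PySem.Dict String String) × PySem.Dict String String)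
    (e : String × String × Option String) :
    List (PySem.Dict String String) × PySem.Dict String String :=
  match e.2.2 with
  | some v =>
      if e.2.1 == "ServerId" && v != "" then
        ((if pvKeepA st.2 then st.1 ++ [st.2] else st.1),
         PySem.Dict.empty.insert "server_id" v)
      else
        (st.1, if pvFieldsA.contains e.2.1 then st.2.insert e.2.1 v else st.2)
  | none => st

def parse_contacts (elements : List (String × String × Option String)) :
    List (List (String × String)) :=
  let st := elements.foldl pvStepA ([], PySem.Dict.empty)
  (if pvKeepA st.2 then st.1 ++ [st.2] else st.1).map (fun d => d.items)

-- ===== PORT B =====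
def pvFieldsB : List String :=
  ["FileAs", "FirstName", "LastName", "MiddleName",
   "CompanyName", "Department", "JobTitle",
   "Email1Address", "Email2Address", "Email3Address",
   "BusinessPhoneNumber", "MobilePhoneNumber",
   "HomePhoneNumber", "BusinessCity", "BusinessStreet"]

def pvTruthyB (v : Option String) : Bool :=
  match v with
  | some s => s != ""
  | none => false

-- pass 1: cut the element stream into ServerId-delimited segments
def pvSegsAux (sid : Option String) (items : List (String × Option String)) :
    List (String × String × Option String) → List (Option String × List (String × Option String))
  | [] => [(sid, items)]
  | e :: rest =>
      if e.2.1 == "ServerId" && pvTruthyB e.2.2 then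
        (sid, items) :: pvSegsAux e.2.2 [] rest
      else
        pvSegsAux sid (items ++ [(e.2.1, e.2.2)]) rest

-- d = {} if sid is None else {"server_id": sid}
def pvSeedB (sid : Option String) : PySem.Dict String String :=
  match sid with
  | none => PySem.Dict.empty
  | some v => PySem.Dict.empty.insert "server_id" v

-- the body of pass 2's inner loop
def pvUpdB (d : PySem.Dict String String) (tv : String × Option String) :
    PySem.Dict String String :=
  match tv.2 with
  | some v => if pvFieldsB.contains tv.1 then d.insert tv.1 v else d
  | none => d

def pvBuildB (seg : Option String × List (String × Option String)) :
    PySem.Dict String String :=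
  seg.2.foldl pvUpdB (pvSeedB seg.1)

def pvKeepB (d : PySem.Dict String String) : Bool :=
  pvTruthyB (d.get? "FileAs") || pvTruthyB (d.get? "FirstName")

def parse_contacts_alt (elements : List (String × String × Option String)) :
    List (List (String × String)) :=
  let segments := pvSegsAux none [] elements
  segments.foldl
    (fun out seg =>
      let d := pvBuildB seg
      if pvKeepB d then out ++ [d.items] else out) []

-- ===== PRECONDITION & SPEC =====
def Spec_parse_contacts (elements : List (String × String × Option String)) (out : List (List (String × String))) : Prop := out = parse_contacts_alt elements
instance (elements : List (String × String × Option String)) (out : List (List (String × String))) : Decidable (Spec_parse_contacts elements out) := by unfold Spec_parse_contacts; infer_instance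

-- ===== CLAIM (what is proved, stated in full; the proofs are below) =====
def Claim_equal_parse_contacts : Prop := ∀ (elements : List (String × String × Option String)), Dom_parse_contacts elements → Spec_parse_contacts elements (parse_contacts elements)

-- ===== LEMMAS AND PROOFS =====

-- common reference form: the contacts emitted by the rest of the stream, given the dict built so far
def pvEmit (d : PySem.Dict String String) :
    List (String × String × Option String) → List (List (String × String))
  | [] => if pvKeepA d then [d.items] else []
  | e :: rest =>
      match e.2.2 with
      | some v =>
          if e.2.1 == "ServerId" && v != "" then
            (if pvKeepA d then [d.items] else []) ++
              pvEmit (PySem.Dict.empty.insert "server_id" v) rest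
          else
            pvEmit (if pvFieldsA.contains e.2.1 then d.insert e.2.1 v else d) rest
      | none => pvEmit d rest

theorem pvA_emit (es : List (String × String × Option String))
    (cs : List (PySem.Dict String String)) (d : PySem.Dict String String) :
    (let st := es.foldl pvStepA (cs, d)
     (if pvKeepA st.2 then st.1 ++ [st.2] else st.1).map (fun d => d.items))
      = cs.map (fun d => d.items) ++ pvEmit d es := by
  induction es generalizing cs d with
  | nil =>
      simp only [List.foldl_nil, pvEmit]
      split <;> simp
  | cons e rest ih =>
      obtain ⟨a, tag, value⟩ := e
      simp only [List.foldl_cons, pvEmit, pvStepA]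
      cases value with
      | none => exact ih cs d
      | some v =>
          simp only
          by_cases h : (tag == "ServerId" && v != "") = true
          · simp only [h, if_true]
            rw [ih]
            by_cases hk : pvKeepA d = true <;> simp [hk]
          · simp only [Bool.not_eq_true] at h
            simp only [h]
            exact ih cs _

theorem pvB_emit (es : List (String × String × Option String))
    (sid : Option String) (acc : List (String × Option String)) :
    ((pvSegsAux sid acc es).filter (fun seg => pvKeepB (pvBuildB seg))).map
        (fun seg => (pvBuildB seg).items)
      = pvEmit (pvBuildB (sid, acc)) es := by
  induction es generalizing sid acc with
  | nil =>
      simp only [pvSegsAux, pvEmit, List.filter, pvKeepB, pvKeepA, pvTruthyB, pvTruthyA]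
      split <;> simp_all
  | cons e rest ih =>
      obtain ⟨a, tag, value⟩ := e
      simp only [pvSegsAux, pvEmit]
      cases value with
      | none =>
          simp only [pvTruthyB, Bool.and_false, Bool.false_eq_true, if_false]
          rw [ih]
          have : pvBuildB (sid, acc ++ [(tag, none)]) = pvBuildB (sid, acc) := by
            simp [pvBuildB, List.foldl_append, pvUpdB]
          rw [this]
      | some v =>
          simp only [pvTruthyB]
          by_cases h : (tag == "ServerId" && v != "") = true
          · simp only [h, if_true, List.filter_cons]
            by_cases hk : pvKeepA (pvBuildB (sid, acc)) = true
            · have hk' : pvKeepB (pvBuildB (sid, acc)) = true := hk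
              rw [if_pos hk', if_pos hk, List.map_cons, ih (some v) []]
              simp [show pvBuildB (some v, []) =
                PySem.Dict.empty.insert "server_id" v from rfl]
            · have hk' : ¬ pvKeepB (pvBuildB (sid, acc)) = true := hk
              rw [if_neg hk', if_neg hk, ih (some v) []]
              simp [show pvBuildB (some v, []) =
                PySem.Dict.empty.insert "server_id" v from rfl]
          · simp only [Bool.not_eq_true] at h
            simp only [h, Bool.false_eq_true, if_false]
            rw [ih]
            have : pvBuildB (sid, acc ++ [(tag, some v)]) =
                (if pvFieldsA.contains tag then (pvBuildB (sid, acc)).insert tag v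
                 else pvBuildB (sid, acc)) := by
              simp only [pvBuildB, List.foldl_append, List.foldl_cons, List.foldl_nil, pvUpdB]
              rfl
            rw [this]

-- ===== VERDICT (by name: the statement is the Claim_ definition above) =====
theorem parse_contacts_spec : Claim_equal_parse_contacts := by
  intro elements _
  unfold Spec_parse_contacts parse_contacts parse_contacts_alt
  rw [PySem.List.foldl_append_if (fun seg => pvKeepB (pvBuildB seg))
        (fun seg => (pvBuildB seg).items)]
  rw [List.nil_append, pvB_emit]
  have := pvA_emit elements [] PySem.Dict.empty
  simpa [pvBuildB, pvSeedB] using this
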